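-- pv_equiv track=rewrite | github.com/hadoop-itmo/sketches-PashovPA | Task_1/count_keys_for_join.py | find_problematic_keys
-- ===== SOURCE A (Python) =====
-- THRESHOLD = 60000
--
-- def find_problematic_keys(count1, count2):
--     """Функция для нахождения ключей, которые вызывают проблему (больше THRESHOLD записей)."""
--     problematic_keys = set()
--
--     # Проверяем ключи из первой таблицы
--     for key, count in count1.items():
--         if count > THRESHOLD or count2.get(key, 0) > THRESHOLD:
--             problematic_keys.add(key)
--
--     # Проверяем ключи из второй таблицы, которых нет в первой
--     for key, count in count2.items():
--         if key not in count1 and count > THRESHOLD: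
--             problematic_keys.add(key)
--
--     return problematic_keys
-- ===== SOURCE B (Python) =====
-- THRESHOLD = 60000
--
-- def find_problematic_keys(count1, count2):
--     """Reduce-by-key: fold every record of both tables into one per-key
--     running-maximum table, then threshold-filter that aggregate once."""
--     max_count = {}
--     for key, count in list(count1.items()) + list(count2.items()):
--         max_count[key] = max(max_count.get(key, 0), count)
--     return {key for key, count in max_count.items() if count > THRESHOLD}
-- ===== Notes on version B (the rewrite author's own statement) =====
-- stated objective: alternative
-- what changed: B first reduces the records of both tables into a single per-key running-maximum dict (a MapReduce-style aggregate A never builds) and then threshold-filters that aggregate once, instead of A's two guarded passes that test thresholds via cross-dict lookups and a 'key not in count1' membership guard.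
import Mathlib
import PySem

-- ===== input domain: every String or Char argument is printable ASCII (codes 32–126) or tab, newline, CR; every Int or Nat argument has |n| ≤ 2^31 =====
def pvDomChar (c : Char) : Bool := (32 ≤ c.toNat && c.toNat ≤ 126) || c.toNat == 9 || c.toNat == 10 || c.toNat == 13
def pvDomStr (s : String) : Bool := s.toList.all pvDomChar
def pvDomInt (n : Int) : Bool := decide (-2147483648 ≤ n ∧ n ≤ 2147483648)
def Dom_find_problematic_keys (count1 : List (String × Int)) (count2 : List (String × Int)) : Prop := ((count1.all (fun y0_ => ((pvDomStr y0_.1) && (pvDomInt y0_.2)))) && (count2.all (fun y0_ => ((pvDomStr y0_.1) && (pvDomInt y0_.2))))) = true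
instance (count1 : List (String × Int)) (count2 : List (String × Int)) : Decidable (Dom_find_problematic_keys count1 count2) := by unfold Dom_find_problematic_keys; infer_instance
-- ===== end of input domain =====

-- B replaces A's two guarded threshold passes by a reduce-by-key aggregation: it folds all
-- records of both tables into one per-key running-maximum dict and threshold-filters that
-- aggregate once (objective: alternative); both return a Python set, here the list of its
-- distinct elements in insertion order.

def THRESHOLD : Int := 60000

-- ===== PORT A =====
def find_problematic_keys (count1 : List (String × Int)) (count2 : List (String × Int)) : List String :=
  let c1 := PySem.Dict.ofList count1
  let c2 := PySem.Dict.ofList count2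
  let pk := c1.items.foldl (fun s kv =>
      if kv.2 > THRESHOLD ∨ c2.getD kv.1 0 > THRESHOLD then PySem.Set.add s kv.1 else s)
    PySem.Set.empty
  c2.items.foldl (fun s kv =>
      if c1.contains kv.1 = false ∧ kv.2 > THRESHOLD then PySem.Set.add s kv.1 else s) pk

-- ===== PORT B =====
def find_problematic_keys_alt (count1 : List (String × Int)) (count2 : List (String × Int)) : List String :=
  let c1 := PySem.Dict.ofList count1
  let c2 := PySem.Dict.ofList count2
  let max_count := (c1.items ++ c2.items).foldl
      (fun d kv => d.insert kv.1 (max (d.getD kv.1 0) kv.2)) PySem.Dict.empty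
  PySem.Set.ofList ((max_count.items.filter (fun kv => kv.2 > THRESHOLD)).map Prod.fst)

-- ===== PRECONDITION & SPEC =====
def Spec_find_problematic_keys (count1 : List (String × Int)) (count2 : List (String × Int)) (out : List String) : Prop := out = find_problematic_keys_alt count1 count2
instance (count1 : List (String × Int)) (count2 : List (String × Int)) (out : List String) : Decidable (Spec_find_problematic_keys count1 count2 out) := by unfold Spec_find_problematic_keys; infer_instance

-- ===== CLAIM (what is proved, stated in full; the proofs are below) =====
def Claim_equal_find_problematic_keys : Prop := ∀ (count1 : List (String × Int)) (count2 : List (String × Int)), Dom_find_problematic_keys count1 count2 → Spec_find_problematic_keys count1 count2 (find_problematic_keys count1 count2)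

-- ===== LEMMAS AND PROOFS =====

theorem fold_if_add (p : String × Int → Prop) [DecidablePred p] (l : List (String × Int))
    (s : PySem.Set String) :
    l.foldl (fun s kv => if p kv then PySem.Set.add s kv.1 else s) s
      = PySem.Set.update s ((l.filter (fun kv => decide (p kv))).map Prod.fst) := by
  induction l generalizing s with
  | nil => simp [PySem.Set.update]
  | cons kv t ih =>
      by_cases h : p kv <;>
        simp [List.foldl_cons, h, ih, PySem.Set.update]

-- the running value at key k of the max-fold is the max-fold of the records whose key is k
theorem foldl_max_getD (l : List (String × Int)) (d : PySem.Dict String Int) (k : String) :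
    ((l.foldl (fun d kv => d.insert kv.1 (max (d.getD kv.1 0) kv.2)) d).getD k 0)
      = (l.filter (fun kv => kv.1 == k)).foldl (fun a kv => max a kv.2) (d.getD k 0) := by
  induction l generalizing d with
  | nil => rfl
  | cons kv t ih =>
      by_cases h : kv.1 = k
      · subst h
        simp [List.foldl_cons, ih]
      · have h2 : k ≠ kv.1 := Ne.symm h
        have h' : (kv.1 == k) = false := by simpa using h
        simp [List.foldl_cons, h', ih, PySem.Dict.getD_insert, h2]

-- a key-nodup association list filtered at one key k keeps exactly its unique record at k
theorem filter_key_of_nodup_mem (l : List (String × Int)) (hn : (l.map Prod.fst).Nodup)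
    (k : String) (v : Int) (hm : (k, v) ∈ l) :
    l.filter (fun kv => kv.1 == k) = [(k, v)] := by
  induction l with
  | nil => simp at hm
  | cons a t ih =>
      simp only [List.map_cons, List.nodup_cons] at hn
      rcases List.mem_cons.mp hm with h | h
      · subst h
        simp only [List.filter_cons, beq_self_eq_true, if_true]
        congr 1
        rw [List.filter_eq_nil_iff]
        rintro ⟨x, w⟩ hx hb
        exact hn.1 (by simpa using ⟨w, by simpa [show x = k from by simpa using hb] using hx⟩)
      · have hk : k ∈ t.map Prod.fst := List.mem_map.mpr ⟨(k, v), h, rfl⟩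
        have ha : (a.1 == k) = false := by
          simp only [beq_eq_false_iff_ne, ne_eq]
          rintro rfl; exact hn.1 hk
        simp only [List.filter_cons, ha, Bool.false_eq_true, if_false]
        exact ih hn.2 h

theorem filter_key_dict (d : PySem.Dict String Int) (hn : d.keys.Nodup) (k : String) :
    d.items.filter (fun kv => kv.1 == k)
      = if d.contains k then [(k, d.getD k 0)] else [] := by
  by_cases hc : d.contains k = true
  · have hs : (d.get? k).isSome = true := by
      rw [← PySem.Dict.contains_eq_isSome_get?]; exact hc
    rcases Option.isSome_iff_exists.mp hs with ⟨v, hv⟩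
    have hgd : d.getD k 0 = v := PySem.Dict.getD_of_get?_eq_some d 0 hv
    simp only [hc, if_true, hgd]
    exact filter_key_of_nodup_mem d.items hn k v (PySem.Dict.mem_items_of_get?_eq_some d hv)
  · have hc' : d.contains k = false := by simpa using hc
    simp only [hc', Bool.false_eq_true, if_false]
    rw [List.filter_eq_nil_iff]
    rintro ⟨x, w⟩ hx hb
    have : d.get? k = some w :=
      PySem.Dict.get?_of_mem_items d (by simpa [show x = k from by simpa using hb] using hx) hn
    rw [PySem.Dict.contains_eq_isSome_get?, this] at hc'
    simp at hc'

-- the aggregated table holds max 0 (max of the two lookups) at every key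
theorem mx_getD (count1 count2 : List (String × Int)) (k : String) :
    (((PySem.Dict.ofList count1).items ++ (PySem.Dict.ofList count2).items).foldl
        (fun d kv => d.insert kv.1 (max (d.getD kv.1 0) kv.2)) PySem.Dict.empty).getD k 0
      = max 0 (max ((PySem.Dict.ofList count1).getD k 0) ((PySem.Dict.ofList count2).getD k 0)) := by
  set d1 := PySem.Dict.ofList count1 with hd1
  set d2 := PySem.Dict.ofList count2 with hd2
  rw [foldl_max_getD, List.filter_append,
      filter_key_dict d1 (PySem.Dict.nodup_keys_ofList count1) k,
      filter_key_dict d2 (PySem.Dict.nodup_keys_ofList count2) k]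
  by_cases h1 : d1.contains k = true <;> by_cases h2 : d2.contains k = true
  · simp only [h1, h2, if_true, List.cons_append, List.nil_append, List.foldl_cons,
      List.foldl_nil, PySem.Dict.getD_empty]
    omega
  · have h2' : d2.contains k = false := by simpa using h2
    rw [PySem.Dict.getD_of_not_contains d2 0 h2']
    simp only [h1, h2', if_true, Bool.false_eq_true, if_false, List.cons_append,
      List.append_nil, List.foldl_cons, List.foldl_nil, PySem.Dict.getD_empty]
    omega
  · have h1' : d1.contains k = false := by simpa using h1
    rw [PySem.Dict.getD_of_not_contains d1 0 h1']
    simp only [h1', h2, if_true, Bool.false_eq_true, if_false, List.cons_append,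
      List.nil_append, List.foldl_cons, List.foldl_nil, PySem.Dict.getD_empty]
    omega
  · have h1' : d1.contains k = false := by simpa using h1
    have h2' : d2.contains k = false := by simpa using h2
    rw [PySem.Dict.getD_of_not_contains d1 0 h1', PySem.Dict.getD_of_not_contains d2 0 h2']
    simp [h1', h2']

theorem main_eq (count1 count2 : List (String × Int)) :
    find_problematic_keys count1 count2 = find_problematic_keys_alt count1 count2 := by
  unfold find_problematic_keys find_problematic_keys_alt
  set d1 := PySem.Dict.ofList count1 with hd1
  set d2 := PySem.Dict.ofList count2 with hd2
  simp only []
  set mx := (d1.items ++ d2.items).foldl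
      (fun d kv => d.insert kv.1 (max (d.getD kv.1 0) kv.2)) PySem.Dict.empty with hmx
  -- B side: turn the filtered items of mx into a filter of its keys by its getD values
  have hmxnodup : mx.keys.Nodup := by
    rw [hmx]
    exact PySem.Dict.nodup_keys_foldl_insert_key _ Prod.fst _ _ PySem.Dict.nodup_keys_empty
  have hitems : mx.items = mx.keys.map (fun k => (k, mx.getD k 0)) :=
    PySem.Dict.items_eq_map_keys mx hmxnodup 0
  have hB : (mx.items.filter (fun kv => kv.2 > THRESHOLD)).map Prod.fst
      = mx.keys.filter (fun k => mx.getD k 0 > THRESHOLD) := by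
    rw [hitems, List.filter_map, List.map_map]
    simp [Function.comp_def]
  rw [hB]
  have hkeys : mx.keys = PySem.Set.update d1.keys d2.keys := by
    rw [hmx, PySem.Dict.keys_foldl_insert_key _ Prod.fst
      (fun d kv => max (d.getD kv.1 0) kv.2) PySem.Dict.empty]
    rw [show (PySem.Dict.empty : PySem.Dict String Int).keys = ([] : List String) from rfl,
        PySem.Set.update_nil_left]
    rw [show ((d1.items ++ d2.items).map Prod.fst) = d1.keys ++ d2.keys from by
          simp [PySem.Dict.keys]]
    rw [PySem.Set.ofList_append,
        PySem.Set.ofList_eq_self_of_nodup d1.keys (PySem.Dict.nodup_keys_ofList count1)]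
  have hcond : ∀ k, (decide (mx.getD k 0 > THRESHOLD))
      = decide (max (d1.getD k 0) (d2.getD k 0) > THRESHOLD) := by
    intro k
    rw [hmx, hd1, hd2, mx_getD count1 count2 k]
    rw [← hd1, ← hd2, decide_eq_decide]
    unfold THRESHOLD; omega
  have hfilter : mx.keys.filter (fun k => mx.getD k 0 > THRESHOLD)
      = mx.keys.filter (fun k => max (d1.getD k 0) (d2.getD k 0) > THRESHOLD) :=
    List.filter_congr (fun k _ => hcond k)
  rw [hfilter, hkeys]
  -- A side: the two guarded passes are the filtered keys of d1 and of d2-minus-d1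
  rw [fold_if_add (fun kv => kv.2 > THRESHOLD ∨ d2.getD kv.1 0 > THRESHOLD),
      fold_if_add (fun kv => d1.contains kv.1 = false ∧ kv.2 > THRESHOLD)]
  rw [show (PySem.Set.empty : PySem.Set String) = ([] : List String) from rfl,
      PySem.Set.update_nil_left, ← PySem.Set.ofList_append]
  rw [PySem.Set.update_eq_append_filter,
      PySem.Set.ofList_eq_self_of_nodup d2.keys (PySem.Dict.nodup_keys_ofList count2),
      List.filter_append]
  congr 1
  congr 1
  · -- first-pass lists
    rw [show d1.keys = d1.items.map Prod.fst from rfl, List.filter_map]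
    congr 1
    apply List.filter_congr
    rintro ⟨k, v⟩ hm
    have hv : d1.getD k 0 = v :=
      PySem.Dict.getD_of_mem_items d1 hm (PySem.Dict.nodup_keys_ofList count1) 0
    simp only [Function.comp, hv, decide_eq_decide]
    constructor
    · rintro (h | h)
      · exact lt_max_iff.mpr (Or.inl h)
      · exact lt_max_iff.mpr (Or.inr h)
    · intro h
      exact lt_max_iff.mp h
  · -- second-pass lists
    rw [List.filter_filter, show d2.keys = d2.items.map Prod.fst from rfl, List.filter_map]
    congr 1
    apply List.filter_congr
    rintro ⟨k, v⟩ hm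
    have hv : d2.getD k 0 = v :=
      PySem.Dict.getD_of_mem_items d2 hm (PySem.Dict.nodup_keys_ofList count2) 0
    simp only [Function.comp, hv]
    by_cases hc : d1.contains k = true
    · have hk : k ∈ d1.keys := (PySem.Dict.contains_iff_mem_keys d1 k).mp hc
      simp [hc, PySem.Set.contains_eq_listContains, hk]
    · have hc' : d1.contains k = false := by simpa using hc
      have hk : k ∉ d1.keys := fun h => hc ((PySem.Dict.contains_iff_mem_keys d1 k).mpr h)
      have h0 : d1.getD k 0 = 0 := PySem.Dict.getD_of_not_contains d1 0 hc'
      simp only [hc', PySem.Set.contains_eq_listContains, h0]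
      simp only [List.contains_eq_mem, hk, decide_false, Bool.not_false, Bool.and_true]
      simp only [decide_eq_decide, THRESHOLD]
      constructor
      · rintro ⟨-, h⟩
        exact lt_max_iff.mpr (Or.inr h)
      · intro h
        rcases lt_max_iff.mp h with h | h
        · omega
        · exact ⟨trivial, h⟩

-- ===== VERDICT (by name: the statement is the Claim_ definition above) =====
theorem find_problematic_keys_spec : Claim_equal_find_problematic_keys := by
  intro count1 count2 _
  exact main_eq count1 count2
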